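-- pv_equiv track=rewrite | github.com/oganes-son/random_aochart | api/index.py | _format_fractions
-- ===== SOURCE A (Python) =====
-- def _format_fractions(math_part):
--     # トップレベルの\fracを\dfracに置換する
--     delimiters = None
--     if math_part.startswith(r'\[') and math_part.endswith(r'\]'): delimiters = (r'\[', r'\]')
--     elif math_part.startswith(r'\(') and math_part.endswith(r'\)'): delimiters = (r'\(', r'\)')
--     elif math_part.startswith('$$') and math_part.endswith('$$'): delimiters = ('$$', '$$')
--     elif math_part.startswith('$') and math_part.endswith('$'): delimiters = ('$', '$')
--     else: return math_part
--     content = math_part[len(delimiters[0]):-len(delimiters[1])]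
--     output_str = ""
--     i = 0
--     brace_level = 0
--     while i < len(content):
--         if content[i:i+5] == '\\frac':
--             if brace_level == 0: output_str += '\\dfrac'
--             else: output_str += '\\frac'
--             i += 5
--         elif content[i] == '{':
--             if i > 0 and content[i-1] != '\\': brace_level += 1
--             elif i == 0: brace_level += 1
--             output_str += content[i]
--             i += 1
--         elif content[i] == '}':
--             if i > 0 and content[i-1] != '\\': brace_level = max(0, brace_level - 1)
--             elif i == 0: brace_level = max(0, brace_level - 1)
--             output_str += content[i]
--             i += 1
--         else:
--             output_str += content[i]
--             i += 1
--     return delimiters[0] + output_str + delimiters[1]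
-- ===== SOURCE B (Python) =====
-- def _format_fractions(math_part):
--     # Two-pass rewrite: precompute a brace-depth table over the content in one pass,
--     # then splice '\dfrac'/'\frac' at the left-to-right '\frac' occurrences found with str.find.
--     if math_part.startswith('\\[') and math_part.endswith('\\]'): d0, d1 = '\\[', '\\]'
--     elif math_part.startswith('\\(') and math_part.endswith('\\)'): d0, d1 = '\\(', '\\)'
--     elif math_part.startswith('$$') and math_part.endswith('$$'): d0, d1 = '$$', '$$'
--     elif math_part.startswith('$') and math_part.endswith('$'): d0, d1 = '$', '$'
--     else: return math_part
--     content = math_part[len(d0):len(math_part) - len(d1)]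
--     depth = []
--     d = 0
--     for i, ch in enumerate(content):
--         depth.append(d)
--         if ch == '{' and (i == 0 or content[i - 1] != '\\'):
--             d += 1
--         elif ch == '}' and (i == 0 or content[i - 1] != '\\'):
--             d = max(0, d - 1)
--     depth.append(d)
--     parts = []
--     pos = 0
--     while True:
--         j = content.find('\\frac', pos)
--         if j == -1:
--             parts.append(content[pos:])
--             break
--         parts.append(content[pos:j])
--         parts.append('\\dfrac' if depth[j] == 0 else '\\frac')
--         pos = j + 5
--     return d0 + ''.join(parts) + d1
-- ===== Notes on version B (the rewrite author's own statement) =====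
-- stated objective: alternative
-- what changed: A's single stateful while-loop that interleaves brace tracking with output building is replaced by a two-pass decomposition: the first pass builds a brace-depth table, a second pass locates the fraction commands with str.find and splices the display-style replacement chosen by the table, copying the text between matches in chunks.
import Mathlib
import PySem

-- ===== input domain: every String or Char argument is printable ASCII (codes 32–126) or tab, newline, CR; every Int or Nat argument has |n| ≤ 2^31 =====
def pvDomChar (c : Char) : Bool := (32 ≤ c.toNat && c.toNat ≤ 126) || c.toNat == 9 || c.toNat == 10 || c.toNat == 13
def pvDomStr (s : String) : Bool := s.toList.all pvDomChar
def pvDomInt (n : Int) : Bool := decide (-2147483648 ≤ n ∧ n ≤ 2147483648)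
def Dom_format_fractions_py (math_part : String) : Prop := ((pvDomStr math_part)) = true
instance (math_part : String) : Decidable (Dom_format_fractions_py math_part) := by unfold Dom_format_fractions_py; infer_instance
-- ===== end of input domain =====

-- B rewrites in two passes (brace-depth table, then splice at the '\frac' occurrences)
-- instead of A's single char-by-char loop; objective: alternative decomposition, same cost.

def fracPat : List Char := ['\\', 'f', 'r', 'a', 'c']
def dfracPat : List Char := ['\\', 'd', 'f', 'r', 'a', 'c']

-- ===== PORT A =====
-- the while loop of A: index i, brace_level, output accumulator
def fmtA_loop (cs : List Char) (i : Nat) (lvl : Int) (acc : List Char) : List Char :=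
  if h : i < cs.length then
    if (cs.drop i).take 5 = fracPat then
      fmtA_loop cs (i + 5) lvl (acc ++ (if lvl = 0 then dfracPat else fracPat))
    else
      let c := cs.getD i ' '
      if c = '{' then
        let lvl' := if 0 < i ∧ cs.getD (i - 1) ' ' ≠ '\\' then lvl + 1
                    else if i = 0 then lvl + 1 else lvl
        fmtA_loop cs (i + 1) lvl' (acc ++ [c])
      else if c = '}' then
        let lvl' := if 0 < i ∧ cs.getD (i - 1) ' ' ≠ '\\' then max 0 (lvl - 1)
                    else if i = 0 then max 0 (lvl - 1) else lvl
        fmtA_loop cs (i + 1) lvl' (acc ++ [c])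
      else fmtA_loop cs (i + 1) lvl (acc ++ [c])
  else acc
termination_by cs.length - i
decreasing_by
  all_goals exact Nat.sub_lt_sub_left h (Nat.lt_add_of_pos_right (by decide))

def fmtA_core (s d0 d1 : List Char) : String :=
  let content := (s.drop d0.length).take (s.length - d0.length - d1.length)
  String.mk (d0 ++ fmtA_loop content 0 0 [] ++ d1)

def format_fractions_py (math_part : String) : String :=
  let s := math_part.toList
  if PySem.Chars.startswith s ['\\', '['] && PySem.Chars.endswith s ['\\', ']'] then
    fmtA_core s ['\\', '['] ['\\', ']']
  else if PySem.Chars.startswith s ['\\', '('] && PySem.Chars.endswith s ['\\', ')'] then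
    fmtA_core s ['\\', '('] ['\\', ')']
  else if PySem.Chars.startswith s ['$', '$'] && PySem.Chars.endswith s ['$', '$'] then
    fmtA_core s ['$', '$'] ['$', '$']
  else if PySem.Chars.startswith s ['$'] && PySem.Chars.endswith s ['$'] then
    fmtA_core s ['$'] ['$']
  else math_part

-- ===== PORT B =====
-- one step of B's depth pass (the if/elif update of d at index i)
def dstepB (cs : List Char) (i : Nat) (d : Int) : Int :=
  if cs.getD i ' ' = '{' ∧ (i = 0 ∨ cs.getD (i - 1) ' ' ≠ '\\') then d + 1
  else if cs.getD i ' ' = '}' ∧ (i = 0 ∨ cs.getD (i - 1) ' ' ≠ '\\') then max 0 (d - 1)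
  else d

-- B's first pass: the brace-depth table (length n+1; depth[i] = depth just before index i)
def depthLoop (cs : List Char) (i : Nat) (d : Int) (acc : List Int) : List Int :=
  if h : i < cs.length then depthLoop cs (i + 1) (dstepB cs i d) (acc ++ [d])
  else acc ++ [d]
termination_by cs.length - i
decreasing_by
  exact Nat.sub_lt_sub_left h (Nat.lt_add_of_pos_right (by decide))

-- port of content.find('\\frac', pos): first index ≥ pos where the needle matches (none = -1); exact for this fixed needle
def findFracFrom (cs : List Char) (pos : Nat) : Option Nat :=
  if h : pos < cs.length then
    if (cs.drop pos).take 5 = fracPat then some pos else findFracFrom cs (pos + 1)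
  else none
termination_by cs.length - pos
decreasing_by
  exact Nat.sub_lt_sub_left h (Nat.lt_add_of_pos_right (by decide))

theorem findFracFrom_bounds {cs : List Char} {pos j : Nat}
    (h : findFracFrom cs pos = some j) : pos ≤ j ∧ j < cs.length := by
  fun_induction findFracFrom cs pos with
  | case1 pos h1 h2 => simp_all
  | case2 pos h1 h2 ih => have := ih h; omega
  | case3 pos h1 => simp_all

-- B's second pass: copy between matches, splice the replacement chosen by the depth table
def fmtB_loop (cs : List Char) (tbl : List Int) (pos : Nat) (parts : List Char) : List Char :=
  match hf : findFracFrom cs pos with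
  | none => parts ++ cs.drop pos
  | some j =>
      fmtB_loop cs tbl (j + 5)
        (parts ++ (cs.drop pos).take (j - pos) ++ (if tbl.getD j 0 = 0 then dfracPat else fracPat))
termination_by cs.length - pos
decreasing_by
  exact Nat.sub_lt_sub_left
    (Nat.lt_of_le_of_lt (findFracFrom_bounds hf).1 (findFracFrom_bounds hf).2)
    (Nat.lt_of_le_of_lt (findFracFrom_bounds hf).1 (Nat.lt_add_of_pos_right (by decide)))

def fmtB_core (s d0 d1 : List Char) : String :=
  let content := (s.drop d0.length).take (s.length - d0.length - d1.length)
  let tbl := depthLoop content 0 0 []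
  String.mk (d0 ++ fmtB_loop content tbl 0 [] ++ d1)

def format_fractions_py_alt (math_part : String) : String :=
  let s := math_part.toList
  if PySem.Chars.startswith s ['\\', '['] && PySem.Chars.endswith s ['\\', ']'] then
    fmtB_core s ['\\', '['] ['\\', ']']
  else if PySem.Chars.startswith s ['\\', '('] && PySem.Chars.endswith s ['\\', ')'] then
    fmtB_core s ['\\', '('] ['\\', ')']
  else if PySem.Chars.startswith s ['$', '$'] && PySem.Chars.endswith s ['$', '$'] then
    fmtB_core s ['$', '$'] ['$', '$']
  else if PySem.Chars.startswith s ['$'] && PySem.Chars.endswith s ['$'] then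
    fmtB_core s ['$'] ['$']
  else math_part

-- ===== PRECONDITION & SPEC =====
def Spec_format_fractions_py (math_part : String) (out : String) : Prop := out = format_fractions_py_alt math_part
instance (math_part : String) (out : String) : Decidable (Spec_format_fractions_py math_part out) := by unfold Spec_format_fractions_py; infer_instance

-- ===== CLAIM (what is proved, stated in full; the proofs are below) =====
def Claim_equal_format_fractions_py : Prop := ∀ (math_part : String), Dom_format_fractions_py math_part → Spec_format_fractions_py math_part (format_fractions_py math_part)

-- ===== LEMMAS AND PROOFS =====

-- depth accumulated by B's step function over indices [i, j)
def depGo (cs : List Char) (i j : Nat) (d : Int) : Int :=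
  (List.range' i (j - i)).foldl (fun a k => dstepB cs k a) d

theorem depGo_self (cs : List Char) (i : Nat) (d : Int) : depGo cs i i d = d := by
  simp [depGo]

theorem depGo_snoc (cs : List Char) {i j : Nat} (d : Int) (h : i ≤ j) :
    depGo cs i (j + 1) d = dstepB cs j (depGo cs i j d) := by
  unfold depGo
  rw [show j + 1 - i = (j - i) + 1 by omega, List.range'_concat]
  simp [show i + (j - i) = j by omega]

theorem depGo_cons (cs : List Char) {i j : Nat} (d : Int) (h : i < j) :
    depGo cs i j d = depGo cs (i + 1) j (dstepB cs i d) := by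
  unfold depGo
  rw [show j - i = (j - (i + 1)) + 1 by omega, List.range'_succ]
  simp

theorem depthLoop_acc (cs : List Char) (i : Nat) (d : Int) (acc : List Int) :
    depthLoop cs i d acc = acc ++ depthLoop cs i d [] := by
  by_cases h : i < cs.length
  · rw [depthLoop]
    conv_rhs => rw [depthLoop]
    simp only [dif_pos h, List.nil_append]
    rw [depthLoop_acc cs (i + 1) (dstepB cs i d) (acc ++ [d]),
        depthLoop_acc cs (i + 1) (dstepB cs i d) [d]]
    simp
  · rw [depthLoop]
    conv_rhs => rw [depthLoop]
    simp [dif_neg h]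
termination_by cs.length - i
decreasing_by all_goals omega

theorem depthLoop_getD (cs : List Char) (i j : Nat) (d : Int) (hij : i ≤ j) (hj : j ≤ cs.length) :
    (depthLoop cs i d []).getD (j - i) 0 = depGo cs i j d := by
  by_cases h : i < cs.length
  · rw [depthLoop]
    simp only [dif_pos h, List.nil_append]
    rw [depthLoop_acc cs (i + 1) (dstepB cs i d) [d], List.singleton_append]
    rcases Nat.eq_or_lt_of_le hij with rfl | hlt
    · simp [depGo_self]
    · rw [show j - i = (j - (i + 1)) + 1 by omega, List.getD_cons_succ,
          depthLoop_getD cs (i + 1) j (dstepB cs i d) (by omega) hj,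
          depGo_cons cs d hlt]
  · have hij' : i = j := by omega
    subst hij'
    rw [depthLoop]
    simp [dif_neg h, depGo_self]
termination_by cs.length - i
decreasing_by all_goals omega

theorem match_le {cs : List Char} {i : Nat} (h : (cs.drop i).take 5 = fracPat) :
    i + 5 ≤ cs.length := by
  have := congrArg List.length h
  simp [fracPat] at this
  omega

theorem dstepB_skip {cs : List Char} {i : Nat} (h : (cs.drop i).take 5 = fracPat)
    {r : Nat} (hr : r < 5) (d : Int) : dstepB cs (i + r) d = d := by
  have hget : cs[i + r]? = fracPat[r]? := by
    rw [← List.getElem?_drop, ← List.getElem?_take_of_lt hr, h]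
  have hD : cs.getD (i + r) ' ' = fracPat.getD r ' ' := by
    simp [List.getD, hget]
  interval_cases r <;> simp [fracPat] at hD <;> simp [dstepB, hD]

theorem depGo_zero_skip {cs : List Char} {i : Nat} (h : (cs.drop i).take 5 = fracPat) :
    depGo cs 0 (i + 5) 0 = depGo cs 0 i 0 := by
  have h0 : ∀ r, r < 5 → ∀ d, dstepB cs (i + r) d = d := fun r hr d => dstepB_skip h hr d
  calc depGo cs 0 (i + 5) 0
      = dstepB cs (i + 4) (depGo cs 0 (i + 4) 0) := depGo_snoc cs 0 (by omega)
    _ = depGo cs 0 (i + 4) 0 := h0 4 (by omega) _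
    _ = dstepB cs (i + 3) (depGo cs 0 (i + 3) 0) := depGo_snoc cs 0 (by omega)
    _ = depGo cs 0 (i + 3) 0 := h0 3 (by omega) _
    _ = dstepB cs (i + 2) (depGo cs 0 (i + 2) 0) := depGo_snoc cs 0 (by omega)
    _ = depGo cs 0 (i + 2) 0 := h0 2 (by omega) _
    _ = dstepB cs (i + 1) (depGo cs 0 (i + 1) 0) := depGo_snoc cs 0 (by omega)
    _ = depGo cs 0 (i + 1) 0 := h0 1 (by omega) _
    _ = dstepB cs (i + 0) (depGo cs 0 (i + 0) 0) := depGo_snoc cs 0 (by omega)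
    _ = depGo cs 0 i 0 := h0 0 (by omega) _

theorem lvlA_open {cs : List Char} {i : Nat} (hb : cs.getD i ' ' = '{') (lvl : Int) :
    (if 0 < i ∧ cs.getD (i - 1) ' ' ≠ '\\' then lvl + 1 else if i = 0 then lvl + 1 else lvl)
      = dstepB cs i lvl := by
  unfold dstepB
  rcases Nat.eq_zero_or_pos i with hi | hi
  · have h1 : ¬ (0 < i ∧ cs.getD (i - 1) ' ' ≠ '\\') := fun hc => by omega
    rw [if_neg h1, if_pos hi, if_pos ⟨hb, Or.inl hi⟩]
  · by_cases hp : cs.getD (i - 1) ' ' = '\\'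
    · have h1 : ¬ (0 < i ∧ cs.getD (i - 1) ' ' ≠ '\\') := fun hc => hc.2 hp
      have h2 : ¬ i = 0 := by omega
      have hact : ¬ (i = 0 ∨ cs.getD (i - 1) ' ' ≠ '\\') :=
        fun hc => hc.elim (fun h0 => h2 h0) (fun hq => hq hp)
      have h3 : ¬ (cs.getD i ' ' = '{' ∧ (i = 0 ∨ cs.getD (i - 1) ' ' ≠ '\\')) := fun hc => hact hc.2
      have h4 : ¬ (cs.getD i ' ' = '}' ∧ (i = 0 ∨ cs.getD (i - 1) ' ' ≠ '\\')) := fun hc => hact hc.2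
      rw [if_neg h1, if_neg h2, if_neg h3, if_neg h4]
    · rw [if_pos ⟨hi, hp⟩, if_pos ⟨hb, Or.inr hp⟩]

theorem lvlA_close {cs : List Char} {i : Nat} (hb : cs.getD i ' ' = '}') (lvl : Int) :
    (if 0 < i ∧ cs.getD (i - 1) ' ' ≠ '\\' then max 0 (lvl - 1) else if i = 0 then max 0 (lvl - 1) else lvl)
      = dstepB cs i lvl := by
  unfold dstepB
  have hno : ¬ (cs.getD i ' ' = '{' ∧ (i = 0 ∨ cs.getD (i - 1) ' ' ≠ '\\')) := by
    rw [hb]; exact fun hc => absurd hc.1 (by decide)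
  rw [if_neg hno]
  rcases Nat.eq_zero_or_pos i with hi | hi
  · have h1 : ¬ (0 < i ∧ cs.getD (i - 1) ' ' ≠ '\\') := fun hc => by omega
    rw [if_neg h1, if_pos hi, if_pos ⟨hb, Or.inl hi⟩]
  · by_cases hp : cs.getD (i - 1) ' ' = '\\'
    · have h1 : ¬ (0 < i ∧ cs.getD (i - 1) ' ' ≠ '\\') := fun hc => hc.2 hp
      have h2 : ¬ i = 0 := by omega
      have h4 : ¬ (cs.getD i ' ' = '}' ∧ (i = 0 ∨ cs.getD (i - 1) ' ' ≠ '\\')) :=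
        fun hc => hc.2.elim (fun h0 => h2 h0) (fun hq => hq hp)
      rw [if_neg h1, if_neg h2, if_neg h4]
    · rw [if_pos ⟨hi, hp⟩, if_pos ⟨hb, Or.inr hp⟩]

theorem lvlA_other {cs : List Char} {i : Nat} (hb : ¬ cs.getD i ' ' = '{')
    (hc : ¬ cs.getD i ' ' = '}') (lvl : Int) : lvl = dstepB cs i lvl := by
  unfold dstepB
  rw [if_neg (fun hx : cs.getD i ' ' = '{' ∧ _ => hb hx.1),
      if_neg (fun hx : cs.getD i ' ' = '}' ∧ _ => hc hx.1)]

theorem fmtA_step {cs : List Char} {i : Nat} (h : i < cs.length)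
    (hm : ¬ (cs.drop i).take 5 = fracPat) (lvl : Int) (acc : List Char) :
    fmtA_loop cs i lvl acc = fmtA_loop cs (i + 1) (dstepB cs i lvl) (acc ++ [cs.getD i ' ']) := by
  rw [fmtA_loop]
  simp only [dif_pos h, if_neg hm]
  by_cases hb : cs.getD i ' ' = '{'
  · rw [if_pos hb, lvlA_open hb lvl]
  · rw [if_neg hb]
    by_cases hc : cs.getD i ' ' = '}'
    · rw [if_pos hc, lvlA_close hc lvl]
    · rw [if_neg hc, ← lvlA_other hb hc lvl]

theorem findFracFrom_succ {cs : List Char} {i : Nat} (h : i < cs.length)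
    (hm : ¬ (cs.drop i).take 5 = fracPat) : findFracFrom cs i = findFracFrom cs (i + 1) := by
  rw [findFracFrom]
  simp [dif_pos h, if_neg hm]

theorem fmtB_stop (cs : List Char) (tbl : List Int) {pos : Nat} (h : cs.length ≤ pos)
    (parts : List Char) : fmtB_loop cs tbl pos parts = parts := by
  have hf : findFracFrom cs pos = none := by
    rw [findFracFrom]; simp [dif_neg (by omega : ¬ pos < cs.length)]
  rw [fmtB_loop]
  split <;> simp_all [List.drop_eq_nil_of_le h]

theorem fmtB_match (cs : List Char) (tbl : List Int) {i : Nat} (h : i < cs.length)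
    (hm : (cs.drop i).take 5 = fracPat) (parts : List Char) :
    fmtB_loop cs tbl i parts =
      fmtB_loop cs tbl (i + 5) (parts ++ (if tbl.getD i 0 = 0 then dfracPat else fracPat)) := by
  have hf : findFracFrom cs i = some i := by
    rw [findFracFrom]; simp [dif_pos h, hm]
  rw [fmtB_loop]
  split <;> simp_all

theorem fmtB_step (cs : List Char) (tbl : List Int) {i : Nat} (h : i < cs.length)
    (hm : ¬ (cs.drop i).take 5 = fracPat) (parts : List Char) :
    fmtB_loop cs tbl i parts = fmtB_loop cs tbl (i + 1) (parts ++ [cs.getD i ' ']) := by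
  have he := findFracFrom_succ h hm
  have hcons : cs.drop i = cs.getD i ' ' :: cs.drop (i + 1) := by
    rw [List.getD_eq_getElem cs ' ' h]
    exact List.drop_eq_getElem_cons h
  rw [fmtB_loop]
  conv_rhs => rw [fmtB_loop]
  split
  next hf =>
    rw [he] at hf
    split
    next _ => rw [hcons]; simp only [List.cons_append, List.nil_append, List.append_assoc]
    next j hf2 => rw [hf] at hf2; cases hf2
  next j hf =>
    rw [he] at hf
    have hb := findFracFrom_bounds hf
    have hsplit : List.take (j - i) (List.drop i cs)
        = cs.getD i ' ' :: List.take (j - (i + 1)) (List.drop (i + 1) cs) := by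
      rw [hcons, show j - i = (j - (i + 1)) + 1 by omega, List.take_succ_cons]
    rw [hsplit]
    split <;> rename_i hif <;>
      (split
       · rename_i hf2; rw [hf] at hf2; cases hf2
       · rename_i j2 hf2
         rw [hf] at hf2
         injection hf2 with hj
         subst hj
         first
           | rw [if_pos hif]
           | rw [if_neg hif]
         simp only [List.cons_append, List.nil_append, List.append_assoc])

theorem loop_eq (cs : List Char) (i : Nat) (lvl : Int) (acc : List Char) (hi : i ≤ cs.length)
    (hlvl : lvl = depGo cs 0 i 0) :
    fmtA_loop cs i lvl acc = fmtB_loop cs (depthLoop cs 0 0 []) i acc := by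
  by_cases h : i < cs.length
  · by_cases hm : (cs.drop i).take 5 = fracPat
    · have h5 := match_le hm
      have htbl : (depthLoop cs 0 0 []).getD i 0 = depGo cs 0 i 0 := by
        simpa using depthLoop_getD cs 0 i 0 (Nat.zero_le _) (by omega)
      rw [fmtA_loop]
      simp only [dif_pos h, if_pos hm]
      rw [fmtB_match cs _ h hm, htbl, ← hlvl]
      exact loop_eq cs (i + 5) lvl _ (by omega)
        (by rw [hlvl, depGo_zero_skip hm])
    · rw [fmtA_step h hm, fmtB_step cs _ h hm]
      exact loop_eq cs (i + 1) (dstepB cs i lvl) _ (by omega)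
        (by rw [hlvl, depGo_snoc cs 0 (Nat.zero_le i)])
  · rw [fmtA_loop]
    simp only [dif_neg h]
    rw [fmtB_stop cs _ (by omega)]
termination_by cs.length - i
decreasing_by all_goals omega

theorem core_eq (s d0 d1 : List Char) : fmtA_core s d0 d1 = fmtB_core s d0 d1 := by
  simp only [fmtA_core, fmtB_core]
  rw [loop_eq _ 0 0 [] (Nat.zero_le _) (by simp [depGo_self])]

-- ===== VERDICT (by name: the statement is the Claim_ definition above) =====
theorem format_fractions_py_spec : Claim_equal_format_fractions_py := by
  intro mp _
  unfold Spec_format_fractions_py format_fractions_py format_fractions_py_alt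
  simp only [core_eq]
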